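-- pv_equiv track=rewrite | github.com/NagahShinawy/problem-solving | pynative/5_strings/ex_4.py | rearrange_letters2
-- ===== SOURCE A (Python) =====
-- from string import ascii_lowercase
--
-- def rearrange_letters2(string: str):
--     lowers = ""
--     uppers = ""
--     for letter in string:
--         if letter in ascii_lowercase:
--             lowers += letter
--         else:
--             uppers += letter
--     return lowers + uppers
-- ===== SOURCE B (Python) =====
-- from string import ascii_lowercase
--
-- def rearrange_letters2(string: str):
--     return "".join(sorted(string, key=lambda c: 0 if c in ascii_lowercase else 1))
-- ===== Notes on version B (the rewrite author's own statement) =====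
-- stated objective: idiomatic
-- what changed: Replaces the manual two-accumulator partition loop with a single stable sort on a binary key (0 for ascii_lowercase, 1 otherwise), whose stability reproduces lowers-then-others in original order.
import Mathlib
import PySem

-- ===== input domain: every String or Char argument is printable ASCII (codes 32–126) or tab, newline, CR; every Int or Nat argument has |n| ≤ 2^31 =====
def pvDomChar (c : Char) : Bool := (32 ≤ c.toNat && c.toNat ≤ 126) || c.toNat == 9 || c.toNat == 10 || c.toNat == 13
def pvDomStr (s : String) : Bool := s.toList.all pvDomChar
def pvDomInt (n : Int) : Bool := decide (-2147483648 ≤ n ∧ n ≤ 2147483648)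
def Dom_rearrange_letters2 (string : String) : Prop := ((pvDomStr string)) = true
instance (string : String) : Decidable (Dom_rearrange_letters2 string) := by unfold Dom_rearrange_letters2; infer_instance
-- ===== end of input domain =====

-- B replaces A's manual two-accumulator partition with one stable sort on a binary key (idiomatic; same return value).

-- string.ascii_lowercase (module constant used by both versions)
def pvAsciiLowercase : List Char := "abcdefghijklmnopqrstuvwxyz".toList

-- ===== PORT A =====
def rearrange_letters2 (string : String) : String :=
  -- lowers = ""; uppers = ""; for letter in string: …; return lowers + uppers
  let p := string.toList.foldl
    (fun (acc : List Char × List Char) letter =>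
      if pvAsciiLowercase.contains letter then (acc.1 ++ [letter], acc.2)
      else (acc.1, acc.2 ++ [letter]))
    ([], [])
  String.ofList (p.1 ++ p.2)

-- ===== PORT B =====
def pvKey (c : Char) : Int := if pvAsciiLowercase.contains c then 0 else 1

def rearrange_letters2_alt (string : String) : String :=
  -- "".join(sorted(string, key=lambda c: 0 if c in ascii_lowercase else 1))
  String.ofList (PySem.List.sorted string.toList pvKey false)

-- ===== PRECONDITION & SPEC =====
def Spec_rearrange_letters2 (string : String) (out : String) : Prop := out = rearrange_letters2_alt string
instance (string : String) (out : String) : Decidable (Spec_rearrange_letters2 string out) := by unfold Spec_rearrange_letters2; infer_instance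

-- ===== CLAIM (what is proved, stated in full; the proofs are below) =====
def Claim_equal_rearrange_letters2 : Prop := ∀ (string : String), Dom_rearrange_letters2 string → Spec_rearrange_letters2 string (rearrange_letters2 string)

-- ===== LEMMAS AND PROOFS =====

-- insertBy appends at the end when x goes before no element
lemma insertBy_end {α : Type} (before : α → α → Bool) (x : α) (l : List α)
    (h : ∀ y ∈ l, before x y = false) :
    PySem.List.insertBy before x l = l ++ [x] := by
  induction l with
  | nil => simp [PySem.List.insertBy]
  | cons y ys ih =>
    have hy := h y (by simp)
    simp [PySem.List.insertBy, hy]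
    exact ih (fun z hz => h z (by simp [hz]))

-- insertBy places x between L and a nonempty U when x goes after all of L and before all of U
lemma insertBy_mid {α : Type} (before : α → α → Bool) (x : α) (L U : List α)
    (hL : ∀ y ∈ L, before x y = false) (hU : ∀ u ∈ U, before x u = true) :
    PySem.List.insertBy before x (L ++ U) = L ++ x :: U := by
  induction L with
  | nil =>
    cases U with
    | nil => simp [PySem.List.insertBy]
    | cons u us => simp [PySem.List.insertBy, hU u (by simp)]
  | cons y ys ih =>
    have hy := hL y (by simp)
    simp [PySem.List.insertBy, hy]
    exact ih (fun z hz => hL z (by simp [hz]))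

-- the stable sort on the binary key is the lowercase/other partition
lemma sorted_key_partition (xs : List Char) :
    PySem.List.sorted xs pvKey false
      = xs.filter (fun c => pvAsciiLowercase.contains c)
        ++ xs.filter (fun c => !pvAsciiLowercase.contains c) := by
  induction xs using List.reverseRecOn with
  | nil => simp [PySem.List.sorted]
  | append_singleton xs x ih =>
    have hstep : PySem.List.sorted (xs ++ [x]) pvKey false
        = PySem.List.insertBy (fun a b => decide (pvKey a < pvKey b)) x
            (PySem.List.sorted xs pvKey false) := by
      simp [PySem.List.sorted, List.foldl_append]
    rw [hstep, ih]
    by_cases hx : x ∈ pvAsciiLowercase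
    · rw [insertBy_mid]
      · simp [hx]
      · intro y hy
        have hy' : y ∈ pvAsciiLowercase := by simpa using (List.mem_filter.mp hy).2
        simp [pvKey, hx, hy']
      · intro u hu
        have hu' : u ∉ pvAsciiLowercase := by simpa using (List.mem_filter.mp hu).2
        simp [pvKey, hx, hu']
    · rw [insertBy_end]
      · simp [hx, List.append_assoc]
      · intro y hy
        rcases List.mem_append.mp hy with h | h
        · have hy' : y ∈ pvAsciiLowercase := by simpa using (List.mem_filter.mp h).2
          simp [pvKey, hx, hy']
        · have hy' : y ∉ pvAsciiLowercase := by simpa using (List.mem_filter.mp h).2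
          simp [pvKey, hx, hy']

-- A's loop computes the two filters
lemma foldl_partition (xs : List Char) (l u : List Char) :
    xs.foldl
      (fun (acc : List Char × List Char) letter =>
        if pvAsciiLowercase.contains letter then (acc.1 ++ [letter], acc.2)
        else (acc.1, acc.2 ++ [letter]))
      (l, u)
      = (l ++ xs.filter (fun c => pvAsciiLowercase.contains c),
         u ++ xs.filter (fun c => !pvAsciiLowercase.contains c)) := by
  induction xs generalizing l u with
  | nil => simp
  | cons x xs ih =>
    by_cases hx : x ∈ pvAsciiLowercase
    · rw [List.foldl_cons, if_pos (by simpa using hx), ih]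
      simp [hx]
    · rw [List.foldl_cons, if_neg (by simpa using hx), ih]
      simp [hx]

-- ===== VERDICT (by name: the statement is the Claim_ definition above) =====
theorem rearrange_letters2_spec : Claim_equal_rearrange_letters2 := by
  intro s _
  unfold Spec_rearrange_letters2 rearrange_letters2 rearrange_letters2_alt
  rw [sorted_key_partition, foldl_partition]
  simp
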